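-- pv_equiv track=rewrite | github.com/allenwind/text-sequence-labeling | old.py | find_entities_by_iobes_tags
-- ===== SOURCE A (Python) =====
-- def find_entities_by_iobes_tags(text, tags):
--     # 根据IOBES标签提取文本中的实体
--     def segment_by_tags(text, tags):
--         buf = ""
--         plabel = None
--         for tag, char in zip(tags, text):
--             if tag == "O":
--                 continue
--             tag, label = tag.split("-")
--             if tag == "B" or tag == "S":
--                 if buf:
--                     yield buf, plabel
--                 buf = char
--             elif tag == "I" or tag == "E":
--                 buf += char
--             plabel = label
--
--         if buf:
--             yield buf, plabel
--     return list(segment_by_tags(text, tags))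
-- ===== SOURCE B (Python) =====
-- def find_entities_by_iobes_tags(text, tags):
--     # Pass 1: flatten to (char, marker, label) triples for every non-O position.
--     items = []
--     for tag, char in zip(tags, text):
--         if tag == "O":
--             continue
--         marker, label = tag.split("-")
--         items.append((char, marker, label))
--     # Pass 2: cut into segments, a new segment before every B/S marker.
--     segments = []
--     group = []
--     for item in items:
--         if group and item[1] in ("B", "S"):
--             segments.append(group)
--             group = [item]
--         else:
--             group.append(item)
--     if group:
--         segments.append(group)
--     # Pass 3: emit (string, label-of-last-triple) for each segment with content.
--     out = []
--     for g in segments: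
--         chars = [c for c, m, _ in g if m in ("B", "S", "I", "E")]
--         if chars:
--             out.append(("".join(chars), g[-1][2]))
--     return out
-- ===== Notes on version B (the rewrite author's own statement) =====
-- stated objective: alternative
-- what changed: Replaced the single stateful generator (buffer + previous-label carried across iterations) by three stateless passes: flatten to (char,marker,label) triples, cut the triple list into segments before each B/S marker, then emit (joined chars, label of the segment's last triple) per segment.
import Mathlib
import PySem

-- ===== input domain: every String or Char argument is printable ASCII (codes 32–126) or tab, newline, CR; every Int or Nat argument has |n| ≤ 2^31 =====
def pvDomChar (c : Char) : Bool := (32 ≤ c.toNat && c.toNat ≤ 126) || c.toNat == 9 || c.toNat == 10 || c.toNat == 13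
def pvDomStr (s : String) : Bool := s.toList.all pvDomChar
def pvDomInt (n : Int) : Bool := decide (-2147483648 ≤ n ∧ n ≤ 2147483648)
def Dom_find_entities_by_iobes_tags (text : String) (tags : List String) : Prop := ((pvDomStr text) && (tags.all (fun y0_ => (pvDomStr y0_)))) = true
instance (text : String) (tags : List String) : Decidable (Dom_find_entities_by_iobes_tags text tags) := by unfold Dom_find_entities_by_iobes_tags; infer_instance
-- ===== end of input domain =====

-- B replaces A's single stateful generator by three stateless passes (flatten to triples,
-- cut into segments before each B/S marker, emit one pair per segment); same cost, alternative decomposition.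


-- ===== PORT A =====
-- A's loop body: state (acc, buf, plabel); buf kept as List Char (Python's growing str).
def pvStepA (st : List (String × String) × List Char × Option String) (p : String × Char) :
    List (String × String) × List Char × Option String :=
  let (acc, buf, plabel) := st
  let (tag, char) := p
  if tag == "O" then st
  else
    match PySem.Str.split? tag "-" with
    | some [t, label] =>
      if t == "B" || t == "S" then
        (if buf.isEmpty then acc else acc ++ [(String.mk buf, plabel.getD "")], [char], some label)
      else if t == "I" || t == "E" then (acc, buf ++ [char], some label)
      else (acc, buf, some label)
    | _ => st  -- `tag, label = tag.split("-")` raises ValueError here: outside Pre_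

def find_entities_by_iobes_tags (text : String) (tags : List String) : List (String × String) :=
  let r := (tags.zip text.toList).foldl pvStepA ([], [], none)
  if r.2.1.isEmpty then r.1 else r.1 ++ [(String.mk r.2.1, r.2.2.getD "")]

-- ===== PORT B =====
def pvIsBS (m : String) : Bool := m == "B" || m == "S"
def pvIsBSIE (m : String) : Bool := m == "B" || m == "S" || m == "I" || m == "E"

-- pass 1: (char, marker, label) triple per non-O position
def pvItems (text : String) (tags : List String) : List (Char × String × String) :=
  (tags.zip text.toList).foldl
    (fun items p =>
      if p.1 == "O" then items
      else
        match PySem.Str.split? p.1 "-" with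
        | some [m, l] => items ++ [(p.2, m, l)]
        | _ => items)  -- ValueError: outside Pre_
    []

-- pass 2: cut into segments, a new segment before every B/S marker
def pvGroupStep (st : List (List (Char × String × String)) × List (Char × String × String))
    (it : Char × String × String) :
    List (List (Char × String × String)) × List (Char × String × String) :=
  if !st.2.isEmpty && pvIsBS it.2.1 then (st.1 ++ [st.2], [it]) else (st.1, st.2 ++ [it])

def pvSegments (items : List (Char × String × String)) : List (List (Char × String × String)) :=
  let r := items.foldl pvGroupStep ([], [])
  if r.2.isEmpty then r.1 else r.1 ++ [r.2]

-- pass 3: the chars of a segment, and its emitted pair (empty if no chars)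
def pvChars (g : List (Char × String × String)) : List Char :=
  g.filterMap (fun it => if pvIsBSIE it.2.1 then some it.1 else none)

def pvEmit (g : List (Char × String × String)) : List (String × String) :=
  let chars := pvChars g
  if chars.isEmpty then [] else [(String.mk chars, ((g.getLast?).map (·.2.2)).getD "")]

def find_entities_by_iobes_tags_alt (text : String) (tags : List String) : List (String × String) :=
  (pvSegments (pvItems text tags)).foldl (fun out g => out ++ pvEmit g) []

-- ===== PRECONDITION & SPEC =====
-- Pre_ excludes exactly the inputs where A raises ValueError: a consumed non-"O" tag whose
-- split on "-" does not give exactly two parts.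
def Pre_find_entities_by_iobes_tags (text : String) (tags : List String) : Prop :=
  ∀ p ∈ tags.zip text.toList, p.1 ≠ "O" → ((PySem.Str.split? p.1 "-").getD []).length = 2
instance (text : String) (tags : List String) : Decidable (Pre_find_entities_by_iobes_tags text tags) := by
  unfold Pre_find_entities_by_iobes_tags; infer_instance
def pvWitness_find_entities_by_iobes_tags : String × List String := ("ab", ["B-PER", "E-PER"])

def Spec_find_entities_by_iobes_tags (text : String) (tags : List String) (out : List (String × String)) : Prop := out = find_entities_by_iobes_tags_alt text tags
instance (text : String) (tags : List String) (out : List (String × String)) : Decidable (Spec_find_entities_by_iobes_tags text tags out) := by unfold Spec_find_entities_by_iobes_tags; infer_instance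

-- ===== CLAIM (what is proved, stated in full; the proofs are below) =====
def Claim_equal_find_entities_by_iobes_tags : Prop := ∀ (text : String) (tags : List String), Dom_find_entities_by_iobes_tags text tags → Pre_find_entities_by_iobes_tags text tags → Spec_find_entities_by_iobes_tags text tags (find_entities_by_iobes_tags text tags)

-- ===== LEMMAS AND PROOFS =====

-- the element translation both passes share: none on "O" (A skips, B skips)
def pvF (p : String × Char) : Option (Char × String × String) :=
  if p.1 == "O" then none
  else
    match PySem.Str.split? p.1 "-" with
    | some [m, l] => some (p.2, m, l)
    | _ => none

-- A's step expressed on triples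
def pvStepA' (st : List (String × String) × List Char × Option String)
    (it : Char × String × String) :
    List (String × String) × List Char × Option String :=
  let (acc, buf, plabel) := st
  let (char, t, label) := it
  if t == "B" || t == "S" then
    (if buf.isEmpty then acc else acc ++ [(String.mk buf, plabel.getD "")], [char], some label)
  else if t == "I" || t == "E" then (acc, buf ++ [char], some label)
  else (acc, buf, some label)

-- recursive form of pass 2
def pvGrp : List (Char × String × String) → List (Char × String × String) →
    List (List (Char × String × String))
  | g, [] => if g.isEmpty then [] else [g]
  | g, it :: rest => if !g.isEmpty && pvIsBS it.2.1 then g :: pvGrp [it] rest else pvGrp (g ++ [it]) rest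

lemma pvItemsStep (acc : List (Char × String × String)) (p : String × Char) :
    (if p.1 == "O" then acc
     else
       match PySem.Str.split? p.1 "-" with
       | some [m, l] => acc ++ [(p.2, m, l)]
       | _ => acc) = acc ++ (pvF p).toList := by
  unfold pvF
  by_cases h : (p.1 == "O") = true
  · simp [h]
  · simp only [h, Bool.false_eq_true, if_false]
    rcases hs : PySem.Str.split? p.1 "-" with _ | parts
    · simp
    · match parts with
      | [] => simp
      | [m] => simp
      | [m, l] => simp
      | m :: l :: x :: xs => simp

lemma pvItems_eq_filterMap (l : List (String × Char)) (acc : List (Char × String × String)) :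
    l.foldl
      (fun items p =>
        if p.1 == "O" then items
        else
          match PySem.Str.split? p.1 "-" with
          | some [m, l] => items ++ [(p.2, m, l)]
          | _ => items) acc = acc ++ l.filterMap pvF := by
  induction l generalizing acc with
  | nil => simp
  | cons p rest ih =>
    rw [List.foldl_cons]
    rw [pvItemsStep acc p]
    rw [List.filterMap_cons]
    rcases hf : pvF p with _ | it
    · simp only [Option.toList_none, List.append_nil]
      exact ih acc
    · simp only [Option.toList_some]
      rw [ih (acc ++ [it])]
      simp

lemma pvFoldA_eq (l : List (String × Char))
    (hpre : ∀ p ∈ l, p.1 ≠ "O" → ((PySem.Str.split? p.1 "-").getD []).length = 2)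
    (st : List (String × String) × List Char × Option String) :
    l.foldl pvStepA st = (l.filterMap pvF).foldl pvStepA' st := by
  induction l generalizing st with
  | nil => rfl
  | cons p rest ih =>
    simp only [List.foldl_cons, List.filterMap_cons]
    by_cases h : p.1 == "O"
    · have : pvF p = none := by simp [pvF, h]
      rw [this]
      have hstep : pvStepA st p = st := by
        obtain ⟨acc, buf, plabel⟩ := st
        obtain ⟨tag, char⟩ := p
        simp_all [pvStepA]
      rw [hstep]
      exact ih (fun q hq => hpre q (List.mem_cons_of_mem _ hq)) st
    · have hne : p.1 ≠ "O" := by simpa using h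
      have hlen := hpre p (List.mem_cons_self) hne
      rcases hs : PySem.Str.split? p.1 "-" with _ | parts
      · rw [hs] at hlen; simp at hlen
      · rw [hs] at hlen
        simp only [Option.getD_some] at hlen
        match parts, hlen with
        | [m, lab], _ =>
          have hf : pvF p = some (p.2, m, lab) := by simp [pvF, h, hs]
          rw [hf]
          have hstep : pvStepA st p = pvStepA' st (p.2, m, lab) := by
            obtain ⟨acc, buf, plabel⟩ := st
            obtain ⟨tag, char⟩ := p
            simp only at hs h ⊢
            simp [pvStepA, pvStepA', h, hs]
          rw [hstep]
          exact ih (fun q hq => hpre q (List.mem_cons_of_mem _ hq)) _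

lemma pvSegFold (items : List (Char × String × String))
    (res : List (List (Char × String × String))) (g : List (Char × String × String)) :
    (let r := items.foldl pvGroupStep (res, g)
     if r.2.isEmpty then r.1 else r.1 ++ [r.2]) = res ++ pvGrp g items := by
  induction items generalizing res g with
  | nil => simp only [List.foldl_nil, pvGrp]; split <;> simp_all
  | cons it rest ih =>
    simp only [List.foldl_cons, pvGrp, pvGroupStep]
    by_cases hc : (!g.isEmpty && pvIsBS it.2.1) = true
    · simp only [hc, if_pos]
      rw [ih]; simp
    · simp only [Bool.not_eq_true] at hc
      simp only [hc, Bool.false_eq_true, if_false]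
      exact ih res (g ++ [it])

lemma pvEmitFold (l : List (List (Char × String × String))) (out : List (String × String)) :
    l.foldl (fun out g => out ++ pvEmit g) out = out ++ l.flatMap pvEmit := by
  induction l generalizing out with
  | nil => simp
  | cons g rest ih => simp [ih]

lemma pvChars_concat (g : List (Char × String × String)) (it : Char × String × String) :
    pvChars (g ++ [it]) = pvChars g ++ (if pvIsBSIE it.2.1 then [it.1] else []) := by
  simp only [pvChars, List.filterMap_append, List.filterMap_cons, List.filterMap_nil]
  by_cases h : pvIsBSIE it.2.1 <;> simp [h]

lemma pvChars_nil_of (g : List (Char × String × String)) (h : g = []) : pvChars g = [] := by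
  simp [pvChars, h]

lemma pvMain (items : List (Char × String × String))
    (acc : List (String × String)) (g : List (Char × String × String)) (pl : Option String)
    (hpl : g ≠ [] → pl = (g.getLast?).map (·.2.2)) :
    (let r := items.foldl pvStepA' (acc, pvChars g, pl)
     if r.2.1.isEmpty then r.1 else r.1 ++ [(String.mk r.2.1, r.2.2.getD "")]) =
    acc ++ (pvGrp g items).flatMap pvEmit := by
  induction items generalizing acc g pl with
  | nil =>
    simp only [List.foldl_nil, pvGrp]
    by_cases hg : g = []
    · simp [hg, pvChars]
    · have hgb : g.isEmpty = false := by simp [hg]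
      simp only [hgb, Bool.false_eq_true, if_false, List.flatMap_cons, List.flatMap_nil,
        List.append_nil, pvEmit]
      rw [hpl hg]
      by_cases hch : pvChars g = []
      · simp [hch]
      · simp [hch]
  | cons it rest ih =>
    obtain ⟨c, m, lab⟩ := it
    simp only [List.foldl_cons, pvGrp]
    by_cases hbs : pvIsBS m = true
    · by_cases hg : g = []
      · -- group empty: B/S starts the first group; buf was empty too
        have hch : pvChars g = [] := pvChars_nil_of g hg
        have hstep : pvStepA' (acc, pvChars g, pl) (c, m, lab) = (acc, [c], some lab) := by
          simp [pvStepA', pvIsBS] at hbs ⊢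
          rcases hbs with h | h <;> simp [h, hch]
        rw [hstep]
        have hgrp : (if !g.isEmpty && pvIsBS (c, m, lab).2.1 then g :: pvGrp [(c, m, lab)] rest
            else pvGrp (g ++ [(c, m, lab)]) rest) = pvGrp [(c, m, lab)] rest := by
          simp [hg]
        rw [hgrp]
        have hch1 : pvChars [(c, m, lab)] = [c] := by
          have : pvIsBSIE m = true := by
            simp [pvIsBS] at hbs; simp [pvIsBSIE]; tauto
          simp [pvChars, this]
        have := ih acc [(c, m, lab)] (some lab) (by simp)
        rw [hch1] at this
        exact this
      · -- group nonempty: close it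
        have hpl' := hpl hg
        have hstep : pvStepA' (acc, pvChars g, pl) (c, m, lab) =
            (acc ++ pvEmit g, [c], some lab) := by
          simp only [pvStepA']
          have hbs' : (m == "B" || m == "S") = true := by simpa [pvIsBS] using hbs
          simp only [hbs', if_pos]
          by_cases hch : pvChars g = []
          · simp [hch, pvEmit]
          · simp [hch, pvEmit, hpl']
        rw [hstep]
        have hgrp : (if !g.isEmpty && pvIsBS (c, m, lab).2.1 then g :: pvGrp [(c, m, lab)] rest
            else pvGrp (g ++ [(c, m, lab)]) rest) = g :: pvGrp [(c, m, lab)] rest := by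
          simp [hg, hbs]
        rw [hgrp]
        have hch1 : pvChars [(c, m, lab)] = [c] := by
          have : pvIsBSIE m = true := by
            simp [pvIsBS] at hbs; simp [pvIsBSIE]; tauto
          simp [pvChars, this]
        have := ih (acc ++ pvEmit g) [(c, m, lab)] (some lab) (by simp)
        rw [hch1] at this
        simpa [List.append_assoc] using this
    · -- not B/S: item joins the current group
      have hgrp : (if !g.isEmpty && pvIsBS (c, m, lab).2.1 then g :: pvGrp [(c, m, lab)] rest
          else pvGrp (g ++ [(c, m, lab)]) rest) = pvGrp (g ++ [(c, m, lab)]) rest := by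
        simp [hbs]
      rw [hgrp]
      have hstep : pvStepA' (acc, pvChars g, pl) (c, m, lab) =
          (acc, pvChars (g ++ [(c, m, lab)]), some lab) := by
        simp only [pvStepA']
        have hbs' : (m == "B" || m == "S") = false := by
          simpa [pvIsBS] using hbs
        rw [pvChars_concat]
        by_cases hie : (m == "I" || m == "E") = true
        · have hb : pvIsBSIE (c, m, lab).2.1 = true := by
            simp only [pvIsBSIE]; simp at hie ⊢; tauto
          simp [hbs', hie, hb]
        · have hie' : (m == "I" || m == "E") = false := by simpa using hie
          have hb : pvIsBSIE (c, m, lab).2.1 = false := by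
            simp only [pvIsBSIE]
            simp at hbs' hie' ⊢
            tauto
          simp [hbs', hie', hb]
      rw [hstep]
      exact ih acc (g ++ [(c, m, lab)]) (some lab)
        (by intro _; simp)

-- ===== VERDICT (by name: the statement is the Claim_ definition above) =====
theorem find_entities_by_iobes_tags_spec : Claim_equal_find_entities_by_iobes_tags := by
  intro text tags _ hpre
  unfold Spec_find_entities_by_iobes_tags
  unfold find_entities_by_iobes_tags find_entities_by_iobes_tags_alt
  rw [pvFoldA_eq _ hpre]
  unfold pvItems
  rw [pvItems_eq_filterMap, List.nil_append, pvEmitFold]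
  unfold pvSegments
  rw [pvSegFold]
  have := pvMain ((tags.zip text.toList).filterMap pvF) [] [] none (by simp)
  simpa [pvChars] using this
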